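-- pv_equiv track=rewrite | github.com/NGFC-Lib/NGFC-Lib | RL_idaes/v17_Released/fs_env.py | all_units_between
-- ===== SOURCE A (Python) =====
-- def all_units_between(list_str_unit_in, list_str_unit_out, string_unit_1, string_unit_2):
--
--     index_1 = [ele for ele in range(len(list_str_unit_in)) if list_str_unit_in[ele] == string_unit_2]
--     for i1 in index_1:
--         unit1 = list_str_unit_out[i1]
--         if list_str_unit_out[i1] == string_unit_1:
--             return [unit1]
--         index_2 = [ele for ele in range(len(list_str_unit_in)) if list_str_unit_in[ele] == list_str_unit_out[i1]]
--
--         for i2 in index_2: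
--             unit2 = list_str_unit_out[i2]
--             if list_str_unit_out[i2] == string_unit_1:
--                 return [unit1, unit2]
--             index_3 = [ele for ele in range(len(list_str_unit_in)) if list_str_unit_in[ele] == list_str_unit_out[i2]]
--
--             for i3 in index_3:
--                 unit3 = list_str_unit_out[i3]
--                 if list_str_unit_out[i3] == string_unit_1:
--                     return [unit1, unit2, unit3]
--                 index_4 = [ele for ele in range(len(list_str_unit_in)) if list_str_unit_in[ele] == list_str_unit_out[i3]]
--
--                 for i4 in index_4:
--                     unit4 = list_str_unit_out[i4]
--                     if list_str_unit_out[i4] == string_unit_1: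
--                         return [unit1, unit2, unit3, unit4]
--                     index_5 = [ele for ele in range(len(list_str_unit_in)) if list_str_unit_in[ele] == list_str_unit_out[i4]]
--
--                     for i5 in index_5:
--                         unit5 = list_str_unit_out[i5]
--                         if list_str_unit_out[i5] == string_unit_1:
--                             return [unit1, unit2, unit3, unit4, unit5]
--                         index_6 = [ele for ele in range(len(list_str_unit_in)) if list_str_unit_in[ele] == list_str_unit_out[i5]]
--
--                         for i6 in index_6:
--                             unit6 = list_str_unit_out[i6]
--                             if list_str_unit_out[i6] == string_unit_1:
--                                 return [unit1, unit2, unit3, unit4, unit5, unit6]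
--                             index_7 = [ele for ele in range(len(list_str_unit_in)) if list_str_unit_in[ele] == list_str_unit_out[i6]]
--
--                             for i7 in index_7:
--                                 unit7 = list_str_unit_out[i7]
--                                 if list_str_unit_out[i7] == string_unit_1:
--                                     return [unit1, unit2, unit3, unit4, unit5, unit6, unit7]
--                                 index_8 = [ele for ele in range(len(list_str_unit_in)) if list_str_unit_in[ele] == list_str_unit_out[i7]]
--
--                                 for i8 in index_8:
--                                     unit8 = list_str_unit_out[i8]
--                                     if list_str_unit_out[i8] == string_unit_1:
--                                         return [unit1, unit2, unit3, unit4, unit5, unit6, unit7, unit8]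
--                                     index_9 = [ele for ele in range(len(list_str_unit_in)) if list_str_unit_in[ele] == list_str_unit_out[i8]]
--
--                                     for i9 in index_9:
--                                         unit9 = list_str_unit_out[i9]
--                                         if list_str_unit_out[i9] == string_unit_1:
--                                             return [unit1, unit2, unit3, unit4, unit5, unit6, unit7, unit8, unit9]
--                                         index_10 = [ele for ele in range(len(list_str_unit_in)) if list_str_unit_in[ele] == list_str_unit_out[i9]]
--
--                                         for i10 in index_10:
--                                             unit10 = list_str_unit_out[i10]
--                                             if list_str_unit_out[i10] == string_unit_1:
--                                                 return [unit1, unit2, unit3, unit4, unit5, unit6, unit7, unit8, unit9, unit10]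
--
--     return []
-- ===== SOURCE B (Python) =====
-- def all_units_between(list_str_unit_in, list_str_unit_out, string_unit_1, string_unit_2):
--     # Recursive depth-capped DFS replacing the ten hand-copied nested loops.
--     def dfs(current, path):
--         for src, dst in zip(list_str_unit_in, list_str_unit_out):
--             if src == current:
--                 if dst == string_unit_1:
--                     return path + [dst]
--                 if len(path) < 9:
--                     found = dfs(dst, path + [dst])
--                     if found is not None:
--                         return found
--         return None
--     return dfs(string_unit_2, []) or []
-- ===== Notes on version B (the rewrite author's own statement) =====
-- stated objective: simpler
-- what changed: The ten hand-copied nested loops are replaced by one recursive helper dfs(current, path) that scans the edge pairs, returns path+[dst] when dst is the target, and recurses while len(path) < 9, reproducing A's exact preorder and depth-10 cap.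
-- outside the precondition, e.g. on all_units_between(['a', 'b'], ['c'], 'z', 'a'): A returns [], B returns []
import Mathlib
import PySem

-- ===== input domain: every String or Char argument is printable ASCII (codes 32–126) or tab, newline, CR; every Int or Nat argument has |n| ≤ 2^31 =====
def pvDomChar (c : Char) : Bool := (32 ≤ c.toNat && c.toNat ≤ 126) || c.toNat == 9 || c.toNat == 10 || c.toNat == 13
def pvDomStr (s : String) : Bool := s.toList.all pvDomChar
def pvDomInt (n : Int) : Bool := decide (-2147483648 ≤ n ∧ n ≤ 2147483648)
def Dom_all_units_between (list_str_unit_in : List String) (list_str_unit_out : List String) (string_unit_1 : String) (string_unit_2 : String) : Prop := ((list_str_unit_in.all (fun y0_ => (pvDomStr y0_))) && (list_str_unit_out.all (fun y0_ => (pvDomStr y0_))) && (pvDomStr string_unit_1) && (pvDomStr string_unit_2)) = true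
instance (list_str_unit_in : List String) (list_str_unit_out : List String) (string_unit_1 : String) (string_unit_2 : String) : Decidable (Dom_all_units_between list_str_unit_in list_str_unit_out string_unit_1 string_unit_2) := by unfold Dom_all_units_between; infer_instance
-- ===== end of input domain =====

-- B replaces A's ten hand-copied nested loops by one recursive depth-capped DFS (objective: simpler).

-- ===== PORT A =====
-- the repeated comprehension [ele for ele in range(len(list_str_unit_in)) if list_str_unit_in[ele] == s]
def pvMatchIdx (inl : List String) (s : String) : List Nat :=
  (List.range inl.length).filter (fun e => inl.getD e "" == s)

-- the innermost (10th) loop; `outl.getD i ""` is Python's outl[i] — exact inside Pre_ (i < outl.length there)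
def pvLoop10 (inl outl : List String) (target : String) (acc : List String) : List Nat → Option (List String)
  | [] => none
  | i :: rest =>
    let unit := outl.getD i ""
    if unit == target then some (acc ++ [unit])
    else pvLoop10 inl outl target acc rest

def pvLoop9 (inl outl : List String) (target : String) (acc : List String) : List Nat → Option (List String)
  | [] => none
  | i :: rest =>
    let unit := outl.getD i ""
    if unit == target then some (acc ++ [unit])
    else match pvLoop10 inl outl target (acc ++ [unit]) (pvMatchIdx inl unit) with
      | some r => some r
      | none => pvLoop9 inl outl target acc rest

def pvLoop8 (inl outl : List String) (target : String) (acc : List String) : List Nat → Option (List String)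
  | [] => none
  | i :: rest =>
    let unit := outl.getD i ""
    if unit == target then some (acc ++ [unit])
    else match pvLoop9 inl outl target (acc ++ [unit]) (pvMatchIdx inl unit) with
      | some r => some r
      | none => pvLoop8 inl outl target acc rest

def pvLoop7 (inl outl : List String) (target : String) (acc : List String) : List Nat → Option (List String)
  | [] => none
  | i :: rest =>
    let unit := outl.getD i ""
    if unit == target then some (acc ++ [unit])
    else match pvLoop8 inl outl target (acc ++ [unit]) (pvMatchIdx inl unit) with
      | some r => some r
      | none => pvLoop7 inl outl target acc rest

def pvLoop6 (inl outl : List String) (target : String) (acc : List String) : List Nat → Option (List String)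
  | [] => none
  | i :: rest =>
    let unit := outl.getD i ""
    if unit == target then some (acc ++ [unit])
    else match pvLoop7 inl outl target (acc ++ [unit]) (pvMatchIdx inl unit) with
      | some r => some r
      | none => pvLoop6 inl outl target acc rest

def pvLoop5 (inl outl : List String) (target : String) (acc : List String) : List Nat → Option (List String)
  | [] => none
  | i :: rest =>
    let unit := outl.getD i ""
    if unit == target then some (acc ++ [unit])
    else match pvLoop6 inl outl target (acc ++ [unit]) (pvMatchIdx inl unit) with
      | some r => some r
      | none => pvLoop5 inl outl target acc rest

def pvLoop4 (inl outl : List String) (target : String) (acc : List String) : List Nat → Option (List String)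
  | [] => none
  | i :: rest =>
    let unit := outl.getD i ""
    if unit == target then some (acc ++ [unit])
    else match pvLoop5 inl outl target (acc ++ [unit]) (pvMatchIdx inl unit) with
      | some r => some r
      | none => pvLoop4 inl outl target acc rest

def pvLoop3 (inl outl : List String) (target : String) (acc : List String) : List Nat → Option (List String)
  | [] => none
  | i :: rest =>
    let unit := outl.getD i ""
    if unit == target then some (acc ++ [unit])
    else match pvLoop4 inl outl target (acc ++ [unit]) (pvMatchIdx inl unit) with
      | some r => some r
      | none => pvLoop3 inl outl target acc rest

def pvLoop2 (inl outl : List String) (target : String) (acc : List String) : List Nat → Option (List String)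
  | [] => none
  | i :: rest =>
    let unit := outl.getD i ""
    if unit == target then some (acc ++ [unit])
    else match pvLoop3 inl outl target (acc ++ [unit]) (pvMatchIdx inl unit) with
      | some r => some r
      | none => pvLoop2 inl outl target acc rest

def pvLoop1 (inl outl : List String) (target : String) (acc : List String) : List Nat → Option (List String)
  | [] => none
  | i :: rest =>
    let unit := outl.getD i ""
    if unit == target then some (acc ++ [unit])
    else match pvLoop2 inl outl target (acc ++ [unit]) (pvMatchIdx inl unit) with
      | some r => some r
      | none => pvLoop1 inl outl target acc rest

def all_units_between (list_str_unit_in : List String) (list_str_unit_out : List String) (string_unit_1 : String) (string_unit_2 : String) : List String :=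
  (pvLoop1 list_str_unit_in list_str_unit_out string_unit_1 [] (pvMatchIdx list_str_unit_in string_unit_2)).getD []

-- ===== PORT B =====
-- dfs(current, path): scan zip(in,out); on a matching edge return path+[dst] if dst is the target,
-- else recurse (depth cap len(path) < 9); `rem` is the remaining part of the scanned pair list.
def pvDfs (allPairs : List (String × String)) (target : String) (current : String) (path : List String) (rem : List (String × String)) : Option (List String) :=
  match rem with
  | [] => none
  | (src, dst) :: rest =>
    if src == current then
      if dst == target then some (path ++ [dst])
      else if _h : path.length < 9 then
        match pvDfs allPairs target dst (path ++ [dst]) allPairs with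
        | some r => some r
        | none => pvDfs allPairs target current path rest
      else pvDfs allPairs target current path rest
    else pvDfs allPairs target current path rest
termination_by (9 - path.length, rem.length)
decreasing_by
  all_goals simp only [List.length_append, List.length_cons, List.length_nil]
  · exact Prod.Lex.left _ _ (by omega)
  · exact Prod.Lex.right _ (by omega)
  · exact Prod.Lex.right _ (by omega)
  · exact Prod.Lex.right _ (by omega)

def all_units_between_alt (list_str_unit_in : List String) (list_str_unit_out : List String) (string_unit_1 : String) (string_unit_2 : String) : List String :=
  (pvDfs (list_str_unit_in.zip list_str_unit_out) string_unit_1 string_unit_2 [] (list_str_unit_in.zip list_str_unit_out)).getD []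

-- ===== PRECONDITION & SPEC =====
-- A raises IndexError when it reads list_str_unit_out at a matching index beyond its length; Pre_
-- conservatively excludes inputs with list_str_unit_out shorter than list_str_unit_in unless
-- string_unit_2 matches nothing (then A reads nothing); this still drops some inputs where the
-- out-of-range read is never reached and A returns [] (see claim cites).
def Pre_all_units_between (list_str_unit_in : List String) (list_str_unit_out : List String) (string_unit_1 : String) (string_unit_2 : String) : Prop :=
  list_str_unit_in.length ≤ list_str_unit_out.length ∨ string_unit_2 ∉ list_str_unit_in
instance (list_str_unit_in : List String) (list_str_unit_out : List String) (string_unit_1 : String) (string_unit_2 : String) : Decidable (Pre_all_units_between list_str_unit_in list_str_unit_out string_unit_1 string_unit_2) := by unfold Pre_all_units_between; infer_instance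

def pvWitness_all_units_between : List String × List String × String × String :=
  (["a", "b"], ["b", "c"], "c", "a")

def Spec_all_units_between (list_str_unit_in : List String) (list_str_unit_out : List String) (string_unit_1 : String) (string_unit_2 : String) (out : List String) : Prop := out = all_units_between_alt list_str_unit_in list_str_unit_out string_unit_1 string_unit_2
instance (list_str_unit_in : List String) (list_str_unit_out : List String) (string_unit_1 : String) (string_unit_2 : String) (out : List String) : Decidable (Spec_all_units_between list_str_unit_in list_str_unit_out string_unit_1 string_unit_2 out) := by unfold Spec_all_units_between; infer_instance

-- ===== CLAIM (what is proved, stated in full; the proofs are below) =====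
def Claim_equal_all_units_between : Prop := ∀ (list_str_unit_in : List String) (list_str_unit_out : List String) (string_unit_1 : String) (string_unit_2 : String), Dom_all_units_between list_str_unit_in list_str_unit_out string_unit_1 string_unit_2 → Pre_all_units_between list_str_unit_in list_str_unit_out string_unit_1 string_unit_2 → Spec_all_units_between list_str_unit_in list_str_unit_out string_unit_1 string_unit_2 (all_units_between list_str_unit_in list_str_unit_out string_unit_1 string_unit_2)

-- ===== LEMMAS AND PROOFS =====

-- fuel-indexed common form of A's ten loops: fuel = number of deeper loop levels still available
def pvLevel (inl outl : List String) (target : String) (fuel : Nat) (acc : List String) (idxs : List Nat) : Option (List String) :=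
  match idxs with
  | [] => none
  | i :: rest =>
    let unit := outl.getD i ""
    if unit == target then some (acc ++ [unit])
    else match fuel with
      | 0 => pvLevel inl outl target 0 acc rest
      | f+1 =>
        match pvLevel inl outl target f (acc ++ [unit]) (pvMatchIdx inl unit) with
        | some r => some r
        | none => pvLevel inl outl target (f+1) acc rest
termination_by (fuel, idxs.length)
decreasing_by
  all_goals simp only [List.length_cons]
  · exact Prod.Lex.right _ (by omega)
  · exact Prod.Lex.left _ _ (by omega)
  · exact Prod.Lex.right _ (by omega)

theorem pvLoop10_eq (inl outl : List String) (target : String) (acc : List String) (idxs : List Nat) :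
    pvLoop10 inl outl target acc idxs = pvLevel inl outl target 0 acc idxs := by
  induction idxs with
  | nil => simp [pvLoop10, pvLevel]
  | cons i rest ih => rw [pvLoop10, pvLevel]; split <;> simp [ih]

theorem pvLoop9_eq (inl outl : List String) (target : String) (acc : List String) (idxs : List Nat) :
    pvLoop9 inl outl target acc idxs = pvLevel inl outl target 1 acc idxs := by
  induction idxs with
  | nil => simp [pvLoop9, pvLevel]
  | cons i rest ih => rw [pvLoop9, pvLevel]; split <;> simp [ih, pvLoop10_eq]

theorem pvLoop8_eq (inl outl : List String) (target : String) (acc : List String) (idxs : List Nat) :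
    pvLoop8 inl outl target acc idxs = pvLevel inl outl target 2 acc idxs := by
  induction idxs with
  | nil => simp [pvLoop8, pvLevel]
  | cons i rest ih => rw [pvLoop8, pvLevel]; split <;> simp [ih, pvLoop9_eq]

theorem pvLoop7_eq (inl outl : List String) (target : String) (acc : List String) (idxs : List Nat) :
    pvLoop7 inl outl target acc idxs = pvLevel inl outl target 3 acc idxs := by
  induction idxs with
  | nil => simp [pvLoop7, pvLevel]
  | cons i rest ih => rw [pvLoop7, pvLevel]; split <;> simp [ih, pvLoop8_eq]

theorem pvLoop6_eq (inl outl : List String) (target : String) (acc : List String) (idxs : List Nat) :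
    pvLoop6 inl outl target acc idxs = pvLevel inl outl target 4 acc idxs := by
  induction idxs with
  | nil => simp [pvLoop6, pvLevel]
  | cons i rest ih => rw [pvLoop6, pvLevel]; split <;> simp [ih, pvLoop7_eq]

theorem pvLoop5_eq (inl outl : List String) (target : String) (acc : List String) (idxs : List Nat) :
    pvLoop5 inl outl target acc idxs = pvLevel inl outl target 5 acc idxs := by
  induction idxs with
  | nil => simp [pvLoop5, pvLevel]
  | cons i rest ih => rw [pvLoop5, pvLevel]; split <;> simp [ih, pvLoop6_eq]

theorem pvLoop4_eq (inl outl : List String) (target : String) (acc : List String) (idxs : List Nat) :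
    pvLoop4 inl outl target acc idxs = pvLevel inl outl target 6 acc idxs := by
  induction idxs with
  | nil => simp [pvLoop4, pvLevel]
  | cons i rest ih => rw [pvLoop4, pvLevel]; split <;> simp [ih, pvLoop5_eq]

theorem pvLoop3_eq (inl outl : List String) (target : String) (acc : List String) (idxs : List Nat) :
    pvLoop3 inl outl target acc idxs = pvLevel inl outl target 7 acc idxs := by
  induction idxs with
  | nil => simp [pvLoop3, pvLevel]
  | cons i rest ih => rw [pvLoop3, pvLevel]; split <;> simp [ih, pvLoop4_eq]

theorem pvLoop2_eq (inl outl : List String) (target : String) (acc : List String) (idxs : List Nat) :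
    pvLoop2 inl outl target acc idxs = pvLevel inl outl target 8 acc idxs := by
  induction idxs with
  | nil => simp [pvLoop2, pvLevel]
  | cons i rest ih => rw [pvLoop2, pvLevel]; split <;> simp [ih, pvLoop3_eq]

theorem pvLoop1_eq (inl outl : List String) (target : String) (acc : List String) (idxs : List Nat) :
    pvLoop1 inl outl target acc idxs = pvLevel inl outl target 9 acc idxs := by
  induction idxs with
  | nil => simp [pvLoop1, pvLevel]
  | cons i rest ih => rw [pvLoop1, pvLevel]; split <;> simp [ih, pvLoop2_eq]

-- main correspondence: A's fueled loop over the filtered index list starting at j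
-- equals B's dfs scanning the zipped pair list from position j, given fuel + acc.length = 9
theorem pvMain (inl outl : List String) (target : String) (hle : inl.length ≤ outl.length) :
    ∀ (fuel : Nat) (j : Nat) (acc : List String) (cur : String), fuel + acc.length = 9 →
      pvLevel inl outl target fuel acc
          ((List.range' j (inl.length - j)).filter (fun e => inl.getD e "" == cur))
        = pvDfs (inl.zip outl) target cur acc ((inl.zip outl).drop j) := by
  intro fuel
  induction fuel with
  | zero =>
    intro j acc cur h9
    have inner : ∀ (k j : Nat), inl.length - j ≤ k →
        pvLevel inl outl target 0 acc
            ((List.range' j (inl.length - j)).filter (fun e => inl.getD e "" == cur))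
          = pvDfs (inl.zip outl) target cur acc ((inl.zip outl).drop j) := by
      intro k
      induction k with
      | zero =>
        intro j hk
        have h0 : inl.length - j = 0 := by omega
        rw [h0, List.drop_eq_nil_of_le (by rw [List.length_zip]; omega)]
        simp [pvLevel, pvDfs]
      | succ k ihk =>
        intro j hk
        by_cases hj : inl.length ≤ j
        · have h0 : inl.length - j = 0 := by omega
          rw [h0, List.drop_eq_nil_of_le (by rw [List.length_zip]; omega)]
          simp [pvLevel, pvDfs]
        · rw [not_le] at hj
          have hjo : j < outl.length := lt_of_lt_of_le hj hle
          have hz : j < (inl.zip outl).length := by rw [List.length_zip]; omega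
          have hr : inl.length - j = (inl.length - (j+1)) + 1 := by omega
          have hdrop : (inl.zip outl).drop j = (inl[j], outl[j]) :: (inl.zip outl).drop (j+1) := by
            rw [List.drop_eq_getElem_cons hz]; simp [List.getElem_zip]
          rw [hr, List.range'_succ, List.filter_cons, hdrop,
            List.getD_eq_getElem inl "" hj]
          rw [pvDfs]
          by_cases hc : (inl[j] == cur) = true
          · simp only [hc, if_pos]
            rw [pvLevel]
            simp only [List.getD_eq_getElem outl "" hjo]
            by_cases ht : (outl[j] == target) = true
            · simp [ht]
            · simp only [ht, if_neg, Bool.false_eq_true, not_false_iff]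
              rw [dif_neg (by omega)]
              exact ihk (j+1) (by omega)
          · simp only [hc, if_neg, Bool.false_eq_true, not_false_iff]
            exact ihk (j+1) (by omega)
    exact inner _ j le_rfl
  | succ f ihf =>
    intro j acc cur h9
    have inner : ∀ (k j : Nat) (cur : String), inl.length - j ≤ k →
        pvLevel inl outl target (f+1) acc
            ((List.range' j (inl.length - j)).filter (fun e => inl.getD e "" == cur))
          = pvDfs (inl.zip outl) target cur acc ((inl.zip outl).drop j) := by
      intro k
      induction k with
      | zero =>
        intro j cur hk
        have h0 : inl.length - j = 0 := by omega
        rw [h0, List.drop_eq_nil_of_le (by rw [List.length_zip]; omega)]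
        simp [pvLevel, pvDfs]
      | succ k ihk =>
        intro j cur hk
        by_cases hj : inl.length ≤ j
        · have h0 : inl.length - j = 0 := by omega
          rw [h0, List.drop_eq_nil_of_le (by rw [List.length_zip]; omega)]
          simp [pvLevel, pvDfs]
        · rw [not_le] at hj
          have hjo : j < outl.length := lt_of_lt_of_le hj hle
          have hz : j < (inl.zip outl).length := by rw [List.length_zip]; omega
          have hr : inl.length - j = (inl.length - (j+1)) + 1 := by omega
          have hdrop : (inl.zip outl).drop j = (inl[j], outl[j]) :: (inl.zip outl).drop (j+1) := by
            rw [List.drop_eq_getElem_cons hz]; simp [List.getElem_zip]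
          rw [hr, List.range'_succ, List.filter_cons, hdrop,
            List.getD_eq_getElem inl "" hj]
          rw [pvDfs]
          by_cases hc : (inl[j] == cur) = true
          · simp only [hc, if_pos]
            rw [pvLevel]
            simp only [List.getD_eq_getElem outl "" hjo]
            by_cases ht : (outl[j] == target) = true
            · simp [ht]
            · simp only [ht, if_neg, Bool.false_eq_true, not_false_iff]
              rw [dif_pos (by omega)]
              have hdesc := ihf 0 (acc ++ [outl[j]]) outl[j] (by simp; omega)
              simp only [Nat.sub_zero, List.drop_zero] at hdesc
              have hmatch : pvMatchIdx inl outl[j]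
                  = (List.range' 0 inl.length).filter (fun e => inl.getD e "" == outl[j]) := by
                rw [pvMatchIdx, List.range_eq_range']
              rw [← hmatch] at hdesc
              rw [hdesc]
              cases pvDfs (inl.zip outl) target outl[j] (acc ++ [outl[j]]) (inl.zip outl) with
              | none => simp; exact ihk (j+1) cur (by omega)
              | some r => simp
          · simp only [hc, if_neg, Bool.false_eq_true, not_false_iff]
            exact ihk (j+1) cur (by omega)
    exact inner _ j cur le_rfl

theorem pvDfs_none (ap : List (String × String)) (t cur : String) (path : List String) :
    ∀ rem, (∀ p ∈ rem, p.1 ≠ cur) → pvDfs ap t cur path rem = none := by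
  intro rem h
  induction rem with
  | nil => simp [pvDfs]
  | cons p rest ih =>
    obtain ⟨src, dst⟩ := p
    rw [pvDfs]
    have hf : (src == cur) = false := by
      simpa using h (src, dst) (List.mem_cons_self ..)
    simp only [hf, Bool.false_eq_true, if_false]
    exact ih (fun q hq => h q (List.mem_cons_of_mem _ hq))

-- ===== VERDICT (by name: the statement is the Claim_ definition above) =====
theorem all_units_between_spec : Claim_equal_all_units_between := by
  intro inl outl u1 u2 _hdom hpre
  unfold Spec_all_units_between all_units_between all_units_between_alt
  rcases hpre with hle | hu2
  · rw [pvLoop1_eq]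
    have h := pvMain inl outl u1 hle 9 0 [] u2 (by simp)
    simp only [Nat.sub_zero, List.drop_zero] at h
    rw [pvMatchIdx, List.range_eq_range', h]
  · have hm : pvMatchIdx inl u2 = [] := by
      rw [pvMatchIdx, List.filter_eq_nil_iff]
      intro e he
      simp only [List.mem_range] at he
      rw [List.getD_eq_getElem inl "" he]
      simp only [beq_iff_eq]
      intro hcontra
      exact hu2 (hcontra ▸ List.getElem_mem he)
    have hb : pvDfs (inl.zip outl) u1 u2 [] (inl.zip outl) = none :=
      pvDfs_none _ _ _ _ _ (fun p hp hfst => hu2 (hfst ▸ (List.of_mem_zip hp).1))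
    rw [hm, hb]
    simp [pvLoop1]
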